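-- pv_equiv track=rewrite | github.com/youngjaean/practice-algorithm | algorithim/kakao_1.py | splitIntoTwo
-- ===== SOURCE A (Python) =====
-- def splitIntoTwo(arr):
--     count = 0
--     left = 0
--     right = sum(arr[0:])
--     for i in range(len(arr) - 1):
--         left += arr[i]
--         right -= arr[i]
--         if left > right:
--             count +=1
--     return count
-- ===== SOURCE B (Python) =====
-- def splitIntoTwo(arr):
--     # Divide and conquer: the grand total is computed once; a segment with a
--     # running base offset is split in halves, split points inside each half are
--     # counted recursively, and the boundary between the halves contributes one
--     # when twice its prefix sum exceeds the total.
--     total = sum(arr)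
--
--     def go(seg, base):
--         if len(seg) <= 1:
--             return 0
--         mid = len(seg) // 2
--         left, right = seg[:mid], seg[mid:]
--         ls = sum(left)
--         boundary = 1 if 2 * (base + ls) > total else 0
--         return go(left, base) + go(right, base + ls) + boundary
--
--     return go(arr, 0)
-- ===== Notes on version B (the rewrite author's own statement) =====
-- stated objective: alternative
-- what changed: Replaces A's left-to-right single pass maintaining count/left/right running counters with a divide-and-conquer recursion: the segment is halved, split points inside each half are counted recursively with a carried base offset, and the mid boundary is tested against the precomputed total.
import Mathlib
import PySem

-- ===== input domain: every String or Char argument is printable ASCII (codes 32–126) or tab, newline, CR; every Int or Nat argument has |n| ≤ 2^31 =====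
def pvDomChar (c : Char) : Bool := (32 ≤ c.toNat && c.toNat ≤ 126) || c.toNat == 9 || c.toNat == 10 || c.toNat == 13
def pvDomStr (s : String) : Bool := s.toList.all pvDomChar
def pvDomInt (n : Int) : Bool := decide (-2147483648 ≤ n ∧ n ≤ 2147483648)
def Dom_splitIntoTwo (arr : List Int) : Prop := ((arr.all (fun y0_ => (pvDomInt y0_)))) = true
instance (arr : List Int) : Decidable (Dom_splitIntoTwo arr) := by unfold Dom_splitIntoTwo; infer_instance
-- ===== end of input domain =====

-- B replaces A's left-to-right count/left/right pass by a divide-and-conquer recursion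
-- over halves of the list (alternative decomposition, not claimed faster).


-- ===== PORT A =====
-- literal transliteration: count/left/right state over 'for i in range(len(arr) - 1)';
-- arr[i] is ported with pyGetD (exact: every index i of the range is in bounds)
def splitIntoTwo (arr : List Int) : Int :=
  let right0 := (PySem.List.slice arr (some 0) none).sum
  ((PySem.List.pyRange 0 ((arr.length : Int) - 1) 1).foldl
    (fun (st : Int × Int × Int) i =>
      let left := st.2.1 + PySem.List.pyGetD arr i 0
      let right := st.2.2 - PySem.List.pyGetD arr i 0
      (if left > right then st.1 + 1 else st.1, left, right))
    (0, 0, right0)).1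

-- ===== PORT B =====
-- literal transliteration of Source B's inner 'go(seg, base)': recursion on halves,
-- mid = len(seg)//2 via PySem.Int.floordiv, seg[:mid]/seg[mid:] via PySem.List.slice
def pvGo (total : Int) (seg : List Int) (base : Int) : Int :=
  if _h : seg.length ≤ 1 then 0
  else
    let mid : Int := PySem.Int.floordiv (seg.length : Int) 2
    let l := PySem.List.slice seg none (some mid)
    let r := PySem.List.slice seg (some mid) none
    let ls := l.sum
    let boundary : Int := if 2 * (base + ls) > total then 1 else 0
    pvGo total l base + pvGo total r (base + ls) + boundary
termination_by seg.length
decreasing_by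
  · have hm : PySem.Int.floordiv ((seg.length : Nat) : Int) 2 = ((seg.length / 2 : Nat) : Int) := by
      exact_mod_cast PySem.Int.floordiv_natCast seg.length 2
    simp only [hm, PySem.List.slice_to_natCast, List.length_take]
    omega
  · have hm : PySem.Int.floordiv ((seg.length : Nat) : Int) 2 = ((seg.length / 2 : Nat) : Int) := by
      exact_mod_cast PySem.Int.floordiv_natCast seg.length 2
    simp only [hm, PySem.List.slice_from_natCast, List.length_drop]
    omega

def splitIntoTwo_alt (arr : List Int) : Int :=
  let total := arr.sum
  pvGo total arr 0

-- ===== PRECONDITION & SPEC =====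
def Spec_splitIntoTwo (arr : List Int) (out : Int) : Prop := out = splitIntoTwo_alt arr
instance (arr : List Int) (out : Int) : Decidable (Spec_splitIntoTwo arr out) := by unfold Spec_splitIntoTwo; infer_instance

-- ===== CLAIM (what is proved, stated in full; the proofs are below) =====
def Claim_equal_splitIntoTwo : Prop := ∀ (arr : List Int), Dom_splitIntoTwo arr → Spec_splitIntoTwo arr (splitIntoTwo arr)

-- ===== LEMMAS AND PROOFS =====

-- the table of partial sums base + sum(seg[:j]) for j = 1 .. len-1 (the split thresholds)
def pvTbl : List Int → Int → List Int
  | [], _ => []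
  | [_], _ => []
  | x :: y :: rest, base => (base + x) :: pvTbl (y :: rest) (base + x)

-- all partial sums a + sum(l[:j]) for j = 1 .. len
def pvTblFull : List Int → Int → List Int
  | [], _ => []
  | x :: rest, a => (a + x) :: pvTblFull rest (a + x)

lemma pvTbl_eq_full_dropLast (seg : List Int) (base : Int) :
    pvTbl seg base = pvTblFull seg.dropLast base := by
  induction seg generalizing base with
  | nil => simp [pvTbl, pvTblFull]
  | cons x rest ih =>
      cases rest with
      | nil => simp [pvTbl, pvTblFull]
      | cons y rest' =>
          simp only [pvTbl, List.dropLast_cons₂, pvTblFull]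
          rw [← ih]

lemma pvTbl_append (l r : List Int) (hr : r ≠ []) (hl : l ≠ []) : ∀ (base : Int),
    pvTbl (l ++ r) base = pvTbl l base ++ (base + l.sum) :: pvTbl r (base + l.sum) := by
  induction l with
  | nil => exact absurd rfl hl
  | cons x l' ih =>
      intro base
      cases l' with
      | nil =>
          obtain ⟨z, zs, rfl⟩ := List.exists_cons_of_ne_nil hr
          simp [pvTbl]
      | cons y l'' =>
          have h1 : (x :: y :: l'') ++ r = x :: ((y :: l'') ++ r) := by simp
          have h2 : (y :: l'') ++ r = y :: (l'' ++ r) := by simp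
          rw [h1, h2]
          show (base + x) :: pvTbl (y :: (l'' ++ r)) (base + x) = _
          rw [← h2, ih (by simp) (base + x)]
          simp [pvTbl, add_assoc]

-- B's recursion computes the count of table entries above the threshold
lemma pvGo_eq_countP (total : Int) :
    ∀ (n : Nat) (seg : List Int), seg.length ≤ n → ∀ (base : Int),
      pvGo total seg base =
        ((pvTbl seg base).countP (fun p => decide (2 * p > total)) : Nat) := by
  intro n
  induction n with
  | zero =>
      intro seg hseg base
      have : seg = [] := List.length_eq_zero_iff.mp (by omega)
      subst this
      rw [pvGo]
      simp [pvTbl]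
  | succ n ih =>
      intro seg hseg base
      rw [pvGo]
      by_cases h : seg.length ≤ 1
      · rcases seg with _ | ⟨x, _ | ⟨y, rest⟩⟩
        · simp [pvTbl]
        · simp [pvTbl]
        · simp at h
      · simp only [dif_neg h]
        have hm : PySem.Int.floordiv (seg.length : Int) 2 = ((seg.length / 2 : Nat) : Int) :=
          PySem.Int.floordiv_natCast seg.length 2
        rw [hm, PySem.List.slice_to_natCast, PySem.List.slice_from_natCast]
        have hlen : 2 ≤ seg.length := by omega
        have hk1 : 1 ≤ seg.length / 2 := by omega
        have hkl : seg.length / 2 < seg.length := by omega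
        have hne : seg ≠ [] := by
          intro e; rw [e] at hlen; simp at hlen
        have hl : seg.take (seg.length / 2) ≠ [] := by
          simp only [ne_eq, List.take_eq_nil_iff, not_or]
          exact ⟨by omega, hne⟩
        have hr : seg.drop (seg.length / 2) ≠ [] := by
          simp only [ne_eq, List.drop_eq_nil_iff]
          omega
        have htk : (seg.take (seg.length / 2)).length ≤ n := by
          have h1 := List.length_take_le (seg.length / 2) (l := seg)
          omega
        have hdk : (seg.drop (seg.length / 2)).length ≤ n := by
          rw [List.length_drop]; omega
        rw [ih _ htk base, ih _ hdk (base + (seg.take (seg.length / 2)).sum)]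
        have hsplit : seg = seg.take (seg.length / 2) ++ seg.drop (seg.length / 2) :=
          (List.take_append_drop _ seg).symm
        conv_rhs => rw [hsplit]
        rw [pvTbl_append _ _ hr hl base, List.countP_append, List.countP_cons]
        by_cases hb : 2 * (base + (seg.take (seg.length / 2)).sum) > total
        · rw [if_pos hb]
          simp only [decide_eq_true_eq, if_pos hb]
          push_cast; ring
        · rw [if_neg hb]
          simp only [decide_eq_true_eq, if_neg hb]
          push_cast; ring

-- A's counter fold over a list counts the entries of the full table above left+right
lemma pvCore (l : List Int) (c left right : Int) :
    (l.foldl (fun (st : Int × Int × Int) x =>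
        (if st.2.1 + x > st.2.2 - x then st.1 + 1 else st.1, st.2.1 + x, st.2.2 - x))
      (c, left, right)).1 =
      c + ((pvTblFull l left).countP (fun p => decide (2 * p > left + right)) : Nat) := by
  induction l generalizing c left right with
  | nil => simp [pvTblFull]
  | cons x l ih =>
      simp only [List.foldl_cons, pvTblFull]
      have hc : (fun p => decide (2 * p > left + right)) =
          (fun p => decide (2 * p > (left + x) + (right - x))) := by
        funext p; simp only [decide_eq_decide]; omega
      rw [List.countP_cons, hc, ih]
      simp only [decide_eq_true_eq]
      by_cases h : left + x > right - x
      · rw [if_pos h, if_pos (show 2 * (left + x) > left + right from by omega)]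
        push_cast; ring
      · rw [if_neg h, if_neg (show ¬ 2 * (left + x) > left + right from by omega)]
        push_cast; ring

-- A's index loop is the counter fold over arr.dropLast
lemma a_as_dropLast (arr : List Int) :
    splitIntoTwo arr =
      ((arr.dropLast).foldl (fun (st : Int × Int × Int) x =>
        (if st.2.1 + x > st.2.2 - x then st.1 + 1 else st.1, st.2.1 + x, st.2.2 - x))
      (0, 0, arr.sum)).1 := by
  unfold splitIntoTwo
  simp only [PySem.List.slice_zero_start, PySem.List.slice_none_none]
  rcases arr with _ | ⟨y, ys⟩
  · simp [PySem.List.pyRange_one_eq_nil]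
  · have hL : ((y :: ys).dropLast).length = (y :: ys).length - 1 := List.length_dropLast
    have hlen : ((y :: ys).length : Int) - 1 = (((y :: ys).dropLast).length : Int) := by
      simp [hL]
    show (List.foldl (fun (st : Int × Int × Int) i =>
        (if st.2.1 + PySem.List.pyGetD (y :: ys) i 0 > st.2.2 - PySem.List.pyGetD (y :: ys) i 0
           then st.1 + 1 else st.1,
         st.2.1 + PySem.List.pyGetD (y :: ys) i 0,
         st.2.2 - PySem.List.pyGetD (y :: ys) i 0))
        (0, 0, (y :: ys).sum) (PySem.List.pyRange 0 (((y :: ys).length : Int) - 1) 1)).1 = _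
    rw [hlen]
    rw [PySem.List.foldl_congr_mem _ _
      (fun (st : Int × Int × Int) i =>
        (if st.2.1 + PySem.List.pyGetD ((y :: ys).dropLast) i 0 >
            st.2.2 - PySem.List.pyGetD ((y :: ys).dropLast) i 0
           then st.1 + 1 else st.1,
         st.2.1 + PySem.List.pyGetD ((y :: ys).dropLast) i 0,
         st.2.2 - PySem.List.pyGetD ((y :: ys).dropLast) i 0))
      _ ?_]
    · exact congrArg Prod.fst (PySem.List.foldl_pyRange_zero_pyGetD' ((y :: ys).dropLast) 0
        (fun (st : Int × Int × Int) x =>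
          (if st.2.1 + x > st.2.2 - x then st.1 + 1 else st.1, st.2.1 + x, st.2.2 - x))
        (0, 0, (y :: ys).sum))
    · intro st i hi
      obtain ⟨h0, hlt⟩ := (PySem.List.mem_pyRange_one).1 hi
      have h1 : i.toNat < ((y :: ys).dropLast).length := by omega
      have h2 : i.toNat < (y :: ys).length := by omega
      have hA : PySem.List.pyGetD (y :: ys) i 0 = (y :: ys)[i.toNat]'h2 :=
        PySem.List.pyGetD_eq_getElem _ _ h0 (by omega)
      have hB : PySem.List.pyGetD ((y :: ys).dropLast) i 0 = ((y :: ys).dropLast)[i.toNat]'h1 :=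
        PySem.List.pyGetD_eq_getElem _ _ h0 hlt
      simp only [hA, hB, List.getElem_dropLast h1]

-- ===== VERDICT (by name: the statement is the Claim_ definition above) =====
theorem splitIntoTwo_spec : Claim_equal_splitIntoTwo := by
  intro arr _
  unfold Spec_splitIntoTwo splitIntoTwo_alt
  rw [a_as_dropLast, pvGo_eq_countP arr.sum arr.length arr le_rfl 0,
      pvTbl_eq_full_dropLast]
  simpa using pvCore arr.dropLast 0 0 arr.sum
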